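-- pv_equiv track=rewrite | github.com/yzkee/phidata | libs/agno/agno/os/interfaces/telegram/formatting.py | _merge_blockquote_lines
-- ===== SOURCE A (Python) =====
-- def _merge_blockquote_lines(text: str) -> str:
--     # Telegram requires contiguous <blockquote> blocks, not per-line > markers
--     lines = text.split("\n")
--     combined: list[str] = []
--     quote_lines: list[str] = []
--     in_quote = False
--     expandable = False
--
--     for line in lines:
--         # **> and >** are non-standard markers that produce expandable blockquotes
--         if line.startswith("**>"):
--             in_quote = True
--             expandable = True
--             quote_lines.append(line[3:].strip())
--         elif line.startswith(">**") and (len(line) == 3 or line[3].isspace()):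
--             in_quote = True
--             expandable = True
--             quote_lines.append(line[3:].strip())
--         elif line.startswith(">"):
--             if not in_quote:
--                 in_quote = True
--                 expandable = False
--             quote_lines.append(line[1:].strip())
--         else:
--             if in_quote:
--                 tag = "blockquote expandable" if expandable else "blockquote"
--                 combined.append(f"<{tag}>" + "\n".join(quote_lines) + "</blockquote>")
--                 quote_lines = []
--                 in_quote = False
--                 expandable = False
--             combined.append(line)
--
--     if in_quote:
--         tag = "blockquote expandable" if expandable else "blockquote"
--         combined.append(f"<{tag}>" + "\n".join(quote_lines) + "</blockquote>")
--
--     return "\n".join(combined)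
-- ===== SOURCE B (Python) =====
-- def _merge_blockquote_lines(text: str) -> str:
--     # classify-group-render pipeline: tag each line, group consecutive runs by quote-ness, render each group
--     def classify(line):
--         if line.startswith("**>"):
--             return (True, True, line[3:].strip())
--         if line.startswith(">**") and (len(line) == 3 or line[3].isspace()):
--             return (True, True, line[3:].strip())
--         if line.startswith(">"):
--             return (True, False, line[1:].strip())
--         return (False, False, line)
--
--     tagged = [classify(line) for line in text.split("\n")]
--     out = []
--     i = 0
--     n = len(tagged)
--     while i < n:
--         j = i + 1
--         while j < n and tagged[j][0] == tagged[i][0]: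
--             j += 1
--         group = tagged[i:j]
--         if tagged[i][0]:
--             tag = "blockquote expandable" if any(t[1] for t in group) else "blockquote"
--             out.append("<" + tag + ">" + "\n".join(t[2] for t in group) + "</blockquote>")
--         else:
--             out.extend(t[2] for t in group)
--         i = j
--     return "\n".join(out)
-- ===== Notes on version B (the rewrite author's own statement) =====
-- stated objective: alternative
-- what changed: Replaces A's stateful single pass (in_quote/expandable/quote_lines mutable state) with a classify-then-group-then-render pipeline: each line is first mapped to an (is_quote, is_marker, content) tuple, consecutive runs with equal is_quote are grouped, and each group is rendered in one step.
import Mathlib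
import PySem

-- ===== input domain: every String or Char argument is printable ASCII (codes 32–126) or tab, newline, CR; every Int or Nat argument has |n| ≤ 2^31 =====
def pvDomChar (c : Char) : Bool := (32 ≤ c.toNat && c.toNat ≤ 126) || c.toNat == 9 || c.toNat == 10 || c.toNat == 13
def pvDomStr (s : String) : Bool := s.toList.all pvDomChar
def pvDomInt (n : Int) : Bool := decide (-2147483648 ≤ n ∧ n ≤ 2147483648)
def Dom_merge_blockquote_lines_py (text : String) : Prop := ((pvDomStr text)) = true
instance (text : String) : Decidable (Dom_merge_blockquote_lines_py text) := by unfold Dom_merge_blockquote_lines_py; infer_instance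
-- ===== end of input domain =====

-- B replaces A's stateful single pass (in_quote/expandable/quote_lines accumulator) by a
-- classify → group-consecutive-runs → render pipeline; objective: alternative (same O(n) cost).

-- ===== PORT A =====
-- A's loop over lines with state (combined, quote_lines, in_quote, expandable); the final
-- 'if in_quote: flush' of A is the [] case.  Lines are List Char (PySem.Chars level).
-- 'line[3].isspace()' is only evaluated after the 'len(line) == 3 or' short-circuit, so
-- index 3 is always in range when read; the 'none' branch of pyGet? is unreachable.
def mergeLoopA : List (List Char) → List (List Char) → List (List Char) → Bool → Bool → List (List Char)
  | [], combined, quote_lines, in_quote, expandable =>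
      if in_quote then
        combined ++ [('<' :: (if expandable then "blockquote expandable".toList else "blockquote".toList) ++ ['>'])
                      ++ PySem.Chars.join ['\n'] quote_lines ++ "</blockquote>".toList]
      else combined
  | line :: rest, combined, quote_lines, in_quote, expandable =>
      if PySem.Chars.startswith line "**>".toList then
        mergeLoopA rest combined (quote_lines ++ [PySem.Chars.strip (PySem.List.slice line (some 3) none)]) true true
      else if PySem.Chars.startswith line ">**".toList
              && (PySem.Chars.len line == 3
                  || (match PySem.List.pyGet? line 3 with
                      | some c => PySem.Chars.isspace c
                      | none => false)) then
        mergeLoopA rest combined (quote_lines ++ [PySem.Chars.strip (PySem.List.slice line (some 3) none)]) true true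
      else if PySem.Chars.startswith line ">".toList then
        -- 'if not in_quote: in_quote = True; expandable = False'
        mergeLoopA rest combined (quote_lines ++ [PySem.Chars.strip (PySem.List.slice line (some 1) none)]) true
          (if in_quote then expandable else false)
      else
        if in_quote then
          mergeLoopA rest
            (combined ++ [('<' :: (if expandable then "blockquote expandable".toList else "blockquote".toList) ++ ['>'])
                           ++ PySem.Chars.join ['\n'] quote_lines ++ "</blockquote>".toList]
                      ++ [line]) [] false false
        else
          mergeLoopA rest (combined ++ [line]) quote_lines in_quote expandable

def merge_blockquote_lines_py (text : String) : String :=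
  String.ofList (PySem.Chars.join ['\n'] (mergeLoopA (PySem.Chars.splitOn text.toList ['\n']) [] [] false false))

-- ===== PORT B =====
-- classify(line) = (is_quote, is_expandable_marker, content)
def classifyB (line : List Char) : Bool × Bool × List Char :=
  if PySem.Chars.startswith line "**>".toList then
    (true, true, PySem.Chars.strip (PySem.List.slice line (some 3) none))
  else if PySem.Chars.startswith line ">**".toList
          && (PySem.Chars.len line == 3
              || (match PySem.List.pyGet? line 3 with
                  | some c => PySem.Chars.isspace c
                  | none => false)) then
    (true, true, PySem.Chars.strip (PySem.List.slice line (some 3) none))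
  else if PySem.Chars.startswith line ">".toList then
    (true, false, PySem.Chars.strip (PySem.List.slice line (some 1) none))
  else
    (false, false, line)

-- B's two while loops: split off the maximal run sharing the head's is_quote flag,
-- render that group, recurse on the remainder
def runsB : List (Bool × Bool × List Char) → List (List Char)
  | [] => []
  | t :: rest =>
      let run := rest.takeWhile (fun u => u.1 == t.1)
      let rest' := rest.dropWhile (fun u => u.1 == t.1)
      (if t.1 then
        [('<' :: (if (t :: run).any (fun u => u.2.1) then "blockquote expandable".toList else "blockquote".toList) ++ ['>'])
          ++ PySem.Chars.join ['\n'] ((t :: run).map (fun u => u.2.2)) ++ "</blockquote>".toList]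
      else (t :: run).map (fun u => u.2.2)) ++ runsB rest'
  termination_by ts => ts.length
  decreasing_by
    have := List.length_dropWhile_le (fun u => u.1 == t.1) rest
    simp only [List.length_cons]
    omega

def merge_blockquote_lines_py_alt (text : String) : String :=
  String.ofList (PySem.Chars.join ['\n'] (runsB ((PySem.Chars.splitOn text.toList ['\n']).map classifyB)))

-- ===== PRECONDITION & SPEC =====
def Spec_merge_blockquote_lines_py (text : String) (out : String) : Prop := out = merge_blockquote_lines_py_alt text
instance (text : String) (out : String) : Decidable (Spec_merge_blockquote_lines_py text out) := by unfold Spec_merge_blockquote_lines_py; infer_instance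

-- ===== CLAIM (what is proved, stated in full; the proofs are below) =====
def Claim_equal_merge_blockquote_lines_py : Prop := ∀ (text : String), Dom_merge_blockquote_lines_py text → Spec_merge_blockquote_lines_py text (merge_blockquote_lines_py text)

-- ===== LEMMAS AND PROOFS =====

-- the rendered HTML of one quote group (A's flush string = B's quote-run string)
def quoteGroup (expandable : Bool) (contents : List (List Char)) : List Char :=
  ('<' :: (if expandable then "blockquote expandable".toList else "blockquote".toList) ++ ['>'])
    ++ PySem.Chars.join ['\n'] contents ++ "</blockquote>".toList

theorem runsB_nil : runsB [] = [] := by rw [runsB]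

theorem runsB_cons_true (m : Bool) (c : List Char) (rest : List (Bool × Bool × List Char)) :
    runsB ((true, m, c) :: rest)
      = quoteGroup (m || (rest.takeWhile (fun u => u.1 == true)).any (fun u => u.2.1))
          (c :: (rest.takeWhile (fun u => u.1 == true)).map (fun u => u.2.2))
        :: runsB (rest.dropWhile (fun u => u.1 == true)) := by
  rw [runsB]; simp [quoteGroup]

theorem runsB_cons_false (m : Bool) (c : List Char) (rest : List (Bool × Bool × List Char)) :
    runsB ((false, m, c) :: rest) = c :: runsB rest := by
  cases rest with
  | nil =>
    conv_lhs => rw [runsB]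
    simp only [List.takeWhile_nil, List.dropWhile_nil, runsB_nil]
    simp
  | cons u us =>
    obtain ⟨q2, m2, c2⟩ := u
    cases q2 with
    | false => conv_lhs => rw [runsB]
               conv_rhs => rw [runsB]
               simp
    | true => conv_lhs => rw [runsB]
              simp

-- one step of A's loop, expressed through B's classification of the head line
theorem stepA_true (line : List Char) (rest combined quote_lines : List (List Char))
    (inq exp m : Bool) (c : List Char) (h : classifyB line = (true, m, c)) :
    mergeLoopA (line :: rest) combined quote_lines inq exp
      = mergeLoopA rest combined (quote_lines ++ [c]) true (if inq then exp || m else m) := by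
  unfold classifyB at h
  split_ifs at h with h1 h2 h3
  · simp only [Prod.mk.injEq, true_and] at h
    obtain ⟨hm, hc⟩ := h; subst hm; subst hc
    conv_lhs => rw [mergeLoopA]
    rw [if_pos h1]
    cases inq <;> simp
  · simp only [Prod.mk.injEq, true_and] at h
    obtain ⟨hm, hc⟩ := h; subst hm; subst hc
    conv_lhs => rw [mergeLoopA]
    rw [if_neg h1, if_pos h2]
    cases inq <;> simp
  · simp only [Prod.mk.injEq, true_and] at h
    obtain ⟨hm, hc⟩ := h; subst hm; subst hc
    conv_lhs => rw [mergeLoopA]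
    rw [if_neg h1, if_neg h2, if_pos h3]
    cases inq <;> simp
  · simp at h

theorem stepA_false (line : List Char) (rest combined quote_lines : List (List Char))
    (inq exp m : Bool) (c : List Char) (h : classifyB line = (false, m, c)) :
    c = line ∧
    mergeLoopA (line :: rest) combined quote_lines inq exp
      = if inq then
          mergeLoopA rest (combined ++ [quoteGroup exp quote_lines] ++ [line]) [] false false
        else mergeLoopA rest (combined ++ [line]) quote_lines inq exp := by
  unfold classifyB at h
  split_ifs at h with h1 h2 h3
  · simp at h
  · simp at h
  · simp at h
  · simp only [Prod.mk.injEq, true_and] at h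
    obtain ⟨hm, hc⟩ := h
    refine ⟨hc.symm, ?_⟩
    conv_lhs => rw [mergeLoopA]
    rw [if_neg h1, if_neg h2, if_neg h3]
    cases inq <;> simp [quoteGroup]

-- the mutual invariant: from a fresh state A's loop is B's pipeline; from a mid-quote state
-- it merges the pending quote lines (and expandable flag) into B's first (quote) run
theorem mergeLoopA_eq (lines : List (List Char)) :
    (∀ combined, mergeLoopA lines combined [] false false
        = combined ++ runsB (lines.map classifyB))
    ∧ (∀ combined quote_lines expandable, mergeLoopA lines combined quote_lines true expandable
        = combined
          ++ quoteGroup (expandable || ((lines.map classifyB).takeWhile (fun u => u.1 == true)).any (fun u => u.2.1))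
               (quote_lines ++ ((lines.map classifyB).takeWhile (fun u => u.1 == true)).map (fun u => u.2.2))
          :: runsB ((lines.map classifyB).dropWhile (fun u => u.1 == true))) := by
  induction lines with
  | nil =>
    constructor <;> intros <;>
      simp [mergeLoopA, runsB_nil, quoteGroup]
  | cons line rest ih =>
    rcases hq : classifyB line with ⟨q, m, c⟩
    cases q with
    | true =>
      constructor
      · intro combined
        rw [stepA_true line rest combined [] false false m c hq, ih.2]
        simp only [List.map_cons, hq, runsB_cons_true]
        simp
      · intro combined quote_lines expandable
        rw [stepA_true line rest combined quote_lines true expandable m c hq, ih.2]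
        simp only [List.map_cons, hq, List.takeWhile_cons, List.dropWhile_cons]
        simp [Bool.or_assoc]
    | false =>
      constructor
      · intro combined
        have h := stepA_false line rest combined [] false false m c hq
        rw [h.2, if_neg (show ¬(false = true) by simp), ih.1]
        simp only [List.map_cons, hq, runsB_cons_false]
        simp [h.1]
      · intro combined quote_lines expandable
        have h := stepA_false line rest combined quote_lines true expandable m c hq
        rw [h.2, if_pos rfl, ih.1]
        simp only [List.map_cons, hq, List.takeWhile_cons, List.dropWhile_cons]
        simp [h.1]
        exact (runsB_cons_false m line _).symm

-- ===== VERDICT (by name: the statement is the Claim_ definition above) =====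
theorem merge_blockquote_lines_py_spec : Claim_equal_merge_blockquote_lines_py := by
  intro text _
  unfold Spec_merge_blockquote_lines_py merge_blockquote_lines_py merge_blockquote_lines_py_alt
  rw [(mergeLoopA_eq _).1]
  simp
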